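-- pv_equiv track=rewrite | github.com/JCharlieDev/BankCardGenerator | BankCardGen.py | ThirdBatch
-- ===== SOURCE A (Python) =====
-- a = 209
--
-- c = 8388608
--
-- def ThirdBatch(seed):
--
-- 	#	Sets the value Xn of the formula.
-- 	xn = seed
-- 	#	Empty strings that stores the second four digits.
-- 	fourDigs = ""
--
-- 	#	Integer to string.
-- 	digs = str(seed)
-- 	#	Indexing the second digit.
-- 	index = int(digs[1])
--
-- 	#	Iterating in the formula.
-- 	for i in range(0, 7):
--
-- 		xi = ((a * xn)%c)
-- 		xn = xi
--
-- 	#	numbres to string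
-- 	newDigs = str(xn)
--
-- 	#	Creating a new string of just the 1st four digits.
-- 	for j in range(0, 4):
--
-- 		fourDigs += newDigs[j]
--
-- 	#	Converting string digits to int
-- 	finalDigs = int(fourDigs)
--
-- 	#	Returning four digits
-- 	return finalDigs
-- ===== SOURCE B (Python) =====
-- a = 209
--
-- c = 8388608
--
-- def ThirdBatch(seed):
-- 	# Closed form of the 7-step LCG:  209^7 * seed  (mod 2^23), then the first four decimal digits.
-- 	xn = pow(a, 7, c) * seed % c
-- 	return int(str(xn)[:4])
-- ===== Notes on version B (the rewrite author's own statement) =====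
-- stated objective: simpler
-- what changed: The 7-iteration LCG loop is replaced by its closed form pow(209,7,8388608)*seed%8388608, and the character-by-character digit loop by a slice str(xn)[:4]; the dead digs[1] line is dropped.
-- outside the precondition, e.g. on ThirdBatch(5): A raises IndexError, B returns 1187; on ThirdBatch(2): A raises IndexError, B returns 7185; on ThirdBatch(4): A raises IndexError, B returns 5982
import Mathlib
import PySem

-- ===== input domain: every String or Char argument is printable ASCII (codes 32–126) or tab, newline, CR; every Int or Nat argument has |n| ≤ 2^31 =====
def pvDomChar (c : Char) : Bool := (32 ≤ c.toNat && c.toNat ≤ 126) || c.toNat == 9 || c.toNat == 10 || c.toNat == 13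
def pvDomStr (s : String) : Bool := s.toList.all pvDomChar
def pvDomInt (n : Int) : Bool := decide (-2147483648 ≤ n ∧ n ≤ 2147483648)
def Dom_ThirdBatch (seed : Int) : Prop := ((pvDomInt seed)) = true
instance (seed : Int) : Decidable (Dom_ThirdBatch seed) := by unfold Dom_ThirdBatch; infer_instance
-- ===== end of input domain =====

-- B replaces the 7-step LCG loop by its closed form pow(209,7,8388608)*seed%8388608 and the
-- digit-collecting loop by a slice str(xn)[:4] (objective: simpler; the dead digs[1] line is dropped).

-- ===== PORT A =====
def ThirdBatch (seed : Int) : Int :=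
  let xn := seed
  let fourDigs := ""
  let digs := PySem.Int.toStr seed
  let _index := (PySem.Int.ofStr? (String.ofList [(PySem.Str.pyGet? digs 1).getD ' '])).getD 0
  let xn := (PySem.List.pyRange 0 7 1).foldl (fun xn _i => PySem.Int.mod (209 * xn) 8388608) xn
  let newDigs := PySem.Int.toStr xn
  let fourDigs := (PySem.List.pyRange 0 4 1).foldl
    (fun s j => s ++ String.ofList [(PySem.Str.pyGet? newDigs j).getD ' ']) fourDigs
  (PySem.Int.ofStr? fourDigs).getD 0

-- ===== PORT B =====
def ThirdBatch_alt (seed : Int) : Int :=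
  let xn := PySem.Int.mod (PySem.Int.powMod 209 7 8388608 * seed) 8388608
  (PySem.Int.ofStr? (PySem.Str.slice (PySem.Int.toStr xn) none (some 4))).getD 0

-- ===== PRECONDITION & SPEC =====
-- Pre_ excludes exactly the inputs on which Python A raises IndexError: seeds whose decimal string
-- has fewer than 2 characters (single-digit seeds), and seeds whose 7-step LCG value has fewer than 4 digits.
def Pre_ThirdBatch (seed : Int) : Prop :=
  2 ≤ (PySem.Int.toChars seed).length ∧
  4 ≤ (PySem.Int.toChars (PySem.Int.mod (209 ^ 7 * seed) 8388608)).length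
instance (seed : Int) : Decidable (Pre_ThirdBatch seed) := by unfold Pre_ThirdBatch; infer_instance
def pvWitness_ThirdBatch : Int := (12)

def Spec_ThirdBatch (seed : Int) (out : Int) : Prop := out = ThirdBatch_alt seed
instance (seed : Int) (out : Int) : Decidable (Spec_ThirdBatch seed out) := by unfold Spec_ThirdBatch; infer_instance

-- ===== CLAIM (what is proved, stated in full; the proofs are below) =====
def Claim_equal_ThirdBatch : Prop := ∀ (seed : Int), Dom_ThirdBatch seed → Pre_ThirdBatch seed → Spec_ThirdBatch seed (ThirdBatch seed)

-- ===== LEMMAS AND PROOFS =====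

-- The 7-step LCG loop equals its closed form mod 8388608.
theorem lcg7 (seed : Int) :
    (PySem.List.pyRange 0 7 1).foldl (fun xn _i => PySem.Int.mod (209 * xn) 8388608) seed
      = PySem.Int.mod (209 ^ 7 * seed) 8388608 := by
  have hr : PySem.List.pyRange 0 7 1 = [0,1,2,3,4,5,6] := by decide
  have hm : ∀ a : Int, PySem.Int.mod a 8388608 = a % 8388608 :=
    fun a => PySem.Int.mod_eq_emod_of_pos (by norm_num)
  have step : ∀ x : Int, (209 * (x % 8388608)) % 8388608 = (209 * x) % 8388608 := by
    intro x
    conv_lhs => rw [Int.mul_emod, Int.emod_emod_of_dvd x (dvd_refl _)]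
    rw [Int.mul_emod 209 x]
  simp only [hr, List.foldl, hm, step]
  ring_nf

-- The 4-iteration character loop builds the slice str(xn)[:4] when the string has ≥ 4 chars.
theorem take4 (s : String) (h : 4 ≤ s.toList.length) :
    (PySem.List.pyRange 0 4 1).foldl
      (fun acc j => acc ++ String.ofList [(PySem.Str.pyGet? s j).getD ' ']) ""
      = PySem.Str.slice s none (some 4) := by
  have hr : PySem.List.pyRange 0 4 1 = [0,1,2,3] := by decide
  obtain ⟨a, b, c, d, t, hs⟩ : ∃ a b c d t, s.toList = a :: b :: c :: d :: t := by
    match hl : s.toList, h with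
    | a :: b :: c :: d :: t, _ => exact ⟨a, b, c, d, t, rfl⟩
  have g0 : PySem.Str.pyGet? s 0 = some a := by simp [pysem, hs]
  have g1 : PySem.Str.pyGet? s 1 = some b := by simp [pysem, hs]
  have g2 : PySem.Str.pyGet? s 2 = some c := by simp [pysem, hs]
  have g3 : PySem.Str.pyGet? s 3 = some d := by simp [pysem, hs]
  have hsl : (PySem.Str.slice s none (some 4)).toList = s.toList.take 4 := by
    simp only [PySem.Str.slice, PySem.Chars.slice_eq_listSlice, Nat.ofNat_nonneg,
      PySem.List.slice_to, Int.reduceToNat, String.toList_ofList]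
  apply String.toList_inj.mp
  rw [hr]
  simp only [List.foldl, g0, g1, g2, g3, Option.getD_some, hsl, hs,
    String.toList_append, String.toList_ofList]
  simp

-- ===== VERDICT (by name: the statement is the Claim_ definition above) =====
theorem ThirdBatch_spec : Claim_equal_ThirdBatch := by
  intro seed _ hpre
  unfold Spec_ThirdBatch ThirdBatch ThirdBatch_alt
  have hm : ∀ a : Int, PySem.Int.mod a 8388608 = a % 8388608 :=
    fun a => PySem.Int.mod_eq_emod_of_pos (by norm_num)
  have hpow : PySem.Int.mod (PySem.Int.powMod 209 7 8388608 * seed) 8388608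
      = PySem.Int.mod (209 ^ 7 * seed) 8388608 := by
    rw [hm, hm, show PySem.Int.powMod 209 7 8388608 = 3592881 from by decide]
    conv_lhs => rw [Int.mul_emod]
    conv_rhs => rw [Int.mul_emod]
    norm_num
  simp only [lcg7, hpow]
  rw [take4]
  rw [PySem.Int.toList_toStr]
  exact hpre.2
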